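-- pv_equiv track=rewrite | github.com/Zzpecter/AT_PROG102_Exercises | p3/p3.py | getDigitsNumber
-- ===== SOURCE A (Python) =====
-- def getDigitsNumber(rawInput):
--         charCount=0
--         digitCount=0
--         line=0
--         auxDigit=[]
--         space = False
--         for char in rawInput:
--             charCount += 1
--             if space:
--                 pass
--                 space=False
--             if charCount == 6:
--                 digitCount += 1
--                 space = True
--                 charCount = 0
--             if char == '\n':
--                 #next line
--                 break
--
--
--         return(digitCount)
-- ===== SOURCE B (Python) =====
-- def getDigitsNumber(rawInput):
--     # stage 1: materialize the prefix up to and including the first newline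
--     prefix = []
--     for char in rawInput:
--         prefix.append(char)
--         if char == '\n':
--             break
--     # stage 2: count the complete 6-item groups by chunking the prefix with zip
--     it = iter(prefix)
--     return sum(1 for _ in zip(it, it, it, it, it, it))
-- ===== Notes on version B (the rewrite author's own statement) =====
-- stated objective: alternative
-- what changed: Replaced A's single-pass charCount/digitCount/space state machine by two stages: first materialize the prefix up to and including the first newline into a list, then count its complete 6-item groups by zip-chunking a shared iterator (no per-character counters at all).
import Mathlib
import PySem

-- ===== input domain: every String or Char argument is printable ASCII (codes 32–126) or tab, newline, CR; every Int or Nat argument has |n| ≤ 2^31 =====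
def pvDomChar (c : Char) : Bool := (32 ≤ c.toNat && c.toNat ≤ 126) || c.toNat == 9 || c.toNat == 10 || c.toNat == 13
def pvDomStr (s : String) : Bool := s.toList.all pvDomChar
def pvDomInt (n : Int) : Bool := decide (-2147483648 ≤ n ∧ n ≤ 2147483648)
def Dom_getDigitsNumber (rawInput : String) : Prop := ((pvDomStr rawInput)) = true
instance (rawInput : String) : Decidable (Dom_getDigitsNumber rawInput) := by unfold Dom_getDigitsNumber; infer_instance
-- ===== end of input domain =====

-- B drops A's charCount/digitCount/space state machine: it first materializes the prefix up to and
-- including the first newline, then counts complete 6-item groups of that prefix (objective: alternative).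

-- ===== PORT A =====
-- for-loop of A with its state (charCount, digitCount, space); break on '\n' after processing the char
def pvLoopA : List Char → Int → Int → Bool → Int
  | [], _, digitCount, _ => digitCount
  | c :: rest, charCount, digitCount, space =>
    let charCount := charCount + 1
    let space := if space then false else space
    let st := if charCount = 6 then ((0 : Int), digitCount + 1, true) else (charCount, digitCount, space)
    if c = '\n' then st.2.1 else pvLoopA rest st.1 st.2.1 st.2.2

def getDigitsNumber (rawInput : String) : Int :=
  pvLoopA rawInput.toList 0 0 false

-- ===== PORT B =====
-- stage 1: the prefix list B builds (append each char, break after '\n')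
def pvPrefixB : List Char → List Char
  | [] => []
  | c :: rest => if c = '\n' then [c] else c :: pvPrefixB rest

-- stage 2: B's zip of six copies of one shared iterator yields one tuple per complete
-- 6-item group; summing 1 per tuple = this recursion consuming six elements per step
def pvZip6CountB : List Char → Int
  | _ :: _ :: _ :: _ :: _ :: _ :: rest => 1 + pvZip6CountB rest
  | _ => 0

def getDigitsNumber_alt (rawInput : String) : Int :=
  pvZip6CountB (pvPrefixB rawInput.toList)

-- ===== PRECONDITION & SPEC =====
def Spec_getDigitsNumber (rawInput : String) (out : Int) : Prop := out = getDigitsNumber_alt rawInput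
instance (rawInput : String) (out : Int) : Decidable (Spec_getDigitsNumber rawInput out) := by unfold Spec_getDigitsNumber; infer_instance

-- ===== CLAIM (what is proved, stated in full; the proofs are below) =====
def Claim_equal_getDigitsNumber : Prop := ∀ (rawInput : String), Dom_getDigitsNumber rawInput → Spec_getDigitsNumber rawInput (getDigitsNumber rawInput)

-- ===== LEMMAS AND PROOFS =====

theorem pvZip6CountB_eq : ∀ (l : List Char), pvZip6CountB l = ((l.length / 6 : Nat) : Int)
  | a :: b :: c :: d :: e :: f :: rest => by
    have ih := pvZip6CountB_eq rest
    simp only [pvZip6CountB, ih, List.length_cons]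
    push_cast
    omega
  | [] => by simp [pvZip6CountB]
  | [_] => by simp [pvZip6CountB]
  | [_, _] => by simp [pvZip6CountB]
  | [_, _, _] => by simp [pvZip6CountB]
  | [_, _, _, _] => by simp [pvZip6CountB]
  | [_, _, _, _, _] => by simp [pvZip6CountB]

theorem pvLoopA_eq (cs : List Char) (cc dc : Int) (sp : Bool)
    (h0 : 0 ≤ cc) (h6 : cc < 6) :
    pvLoopA cs cc dc sp = dc + (((cc.toNat + (pvPrefixB cs).length) / 6 : Nat) : Int) := by
  induction cs generalizing cc dc sp with
  | nil =>
    simp only [pvLoopA, pvPrefixB, List.length_nil]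
    have : cc.toNat < 6 := by omega
    have h : (cc.toNat + 0) / 6 = 0 := by omega
    rw [h]; simp
  | cons c rest ih =>
    simp only [pvLoopA, pvPrefixB]
    by_cases hn : c = '\n'
    · simp only [hn, if_true]
      by_cases hc6 : cc + 1 = 6
      · simp only [hc6, if_true, List.length_singleton]
        have h : (cc.toNat + 1) / 6 = 1 := by omega
        rw [h]; simp
      · simp only [if_neg hc6, List.length_singleton]
        have h : (cc.toNat + 1) / 6 = 0 := by omega
        rw [h]; simp
    · simp only [if_neg hn, List.length_cons]
      by_cases hc6 : cc + 1 = 6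
      · simp only [hc6, if_true]
        rw [ih 0 (dc + 1) true (by omega) (by omega)]
        have hcc : cc.toNat = 5 := by omega
        rw [hcc]
        have h : (5 + ((pvPrefixB rest).length + 1)) / 6
               = (pvPrefixB rest).length / 6 + 1 := by omega
        rw [h]
        push_cast
        omega
      · simp only [if_neg hc6]
        rw [ih (cc + 1) dc _ (by omega) (by omega)]
        have h : (cc + 1).toNat + (pvPrefixB rest).length
               = cc.toNat + ((pvPrefixB rest).length + 1) := by omega
        rw [h]

-- ===== VERDICT (by name: the statement is the Claim_ definition above) =====
theorem getDigitsNumber_spec : Claim_equal_getDigitsNumber := by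
  intro rawInput _
  unfold Spec_getDigitsNumber getDigitsNumber getDigitsNumber_alt
  rw [pvZip6CountB_eq, pvLoopA_eq rawInput.toList 0 0 false (by omega) (by omega)]
  simp
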